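-- pv_equiv track=rewrite | github.com/Krutheesh/Placement_Assignment_Krutheesh | DSA/assignment16/three.py | delete_middle_element
-- ===== SOURCE A (Python) =====
-- def delete_middle_element(stack):
--     size = len(stack)
--     mid_index = size // 2
--     count = 0
--     temp_stack = []
--
--     while stack:
--         if count == mid_index:
--             stack.pop()
--         else:
--             temp_stack.append(stack.pop())
--
--         count += 1
--
--     while temp_stack:
--         stack.append(temp_stack.pop())
--
--     return stack
-- ===== SOURCE B (Python) =====
-- def delete_middle_element(stack):
--     if stack:
--         del stack[(len(stack) - 1) // 2]
--     return stack
-- ===== Notes on version B (the rewrite author's own statement) =====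
-- stated objective: simpler
-- what changed: Replaces the pop-and-restore traversal with two while-loops and a temporary stack by a single closed-form deletion: the dropped element is exactly index (len-1)//2, removed in place with del.
import Mathlib
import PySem

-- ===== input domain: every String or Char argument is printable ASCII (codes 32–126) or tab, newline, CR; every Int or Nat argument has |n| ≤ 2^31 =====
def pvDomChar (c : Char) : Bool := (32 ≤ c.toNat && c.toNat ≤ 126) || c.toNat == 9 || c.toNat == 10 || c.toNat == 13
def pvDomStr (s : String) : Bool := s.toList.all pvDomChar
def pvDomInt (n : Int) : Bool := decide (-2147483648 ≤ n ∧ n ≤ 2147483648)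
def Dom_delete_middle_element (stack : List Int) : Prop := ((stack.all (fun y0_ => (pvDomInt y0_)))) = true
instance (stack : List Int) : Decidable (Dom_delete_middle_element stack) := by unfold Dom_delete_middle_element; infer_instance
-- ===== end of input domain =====

-- B replaces A's two pop-and-restore while-loops with a single closed-form deletion at
-- index (len-1)//2 (objective: simpler). Python A mutates `stack` in place; equivalence
-- here is about the RETURN value (B performs the same in-place mutation in Python).

-- ===== PORT A =====
-- first while-loop: `stack.pop()` takes the head of the reversed stack; `count == mid_index`
-- drops the element, otherwise it is appended to temp_stack.
def pvLoop1 : List Int → List Int → Nat → Nat → List Int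
  | [], temp, _, _ => temp
  | x :: rest, temp, count, mid =>
    if count = mid then pvLoop1 rest temp (count + 1) mid
    else pvLoop1 rest (temp ++ [x]) (count + 1) mid

-- second while-loop: pops temp_stack from the end, appending to the (now empty) stack.
def pvLoop2 : List Int → List Int → List Int
  | [], s => s
  | x :: r, s => pvLoop2 r (s ++ [x])

def delete_middle_element (stack : List Int) : List Int :=
  pvLoop2 (pvLoop1 stack.reverse [] 0 (stack.length / 2)).reverse []

-- ===== PORT B =====
def delete_middle_element_alt (stack : List Int) : List Int :=
  if stack.isEmpty then stack
  else stack.eraseIdx ((stack.length - 1) / 2)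

-- ===== PRECONDITION & SPEC =====
def Spec_delete_middle_element (stack : List Int) (out : List Int) : Prop := out = delete_middle_element_alt stack
instance (stack : List Int) (out : List Int) : Decidable (Spec_delete_middle_element stack out) := by unfold Spec_delete_middle_element; infer_instance

-- ===== CLAIM (what is proved, stated in full; the proofs are below) =====
def Claim_equal_delete_middle_element : Prop := ∀ (stack : List Int), Dom_delete_middle_element stack → Spec_delete_middle_element stack (delete_middle_element stack)

-- ===== LEMMAS AND PROOFS =====

theorem pvLoop2_eq (l s : List Int) : pvLoop2 l s = s ++ l := by
  induction l generalizing s with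
  | nil => simp [pvLoop2]
  | cons x r ih => simp [pvLoop2, ih]

theorem pvLoop1_eq (l : List Int) : ∀ (temp : List Int) (c m : Nat),
    pvLoop1 l temp c m =
      temp ++ (if m < c then l else l.eraseIdx (m - c)) := by
  induction l with
  | nil => intro temp c m; simp [pvLoop1, List.eraseIdx]
  | cons x rest ih =>
    intro temp c m
    by_cases h : c = m
    · subst h
      simp [pvLoop1, ih]
    · rw [pvLoop1, if_neg h, ih]
      by_cases hlt : m < c
      · rw [if_pos (Nat.lt_succ_of_lt hlt), if_pos hlt]; simp
      · have hcm : c < m := Nat.lt_of_le_of_ne (Nat.le_of_not_lt hlt) h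
        rw [if_neg (by omega : ¬ m < c + 1), if_neg hlt]
        have : m - c = (m - (c + 1)) + 1 := by omega
        rw [this, List.eraseIdx]
        simp

theorem reverse_eraseIdx_reverse (l : List Int) (i : Nat) (h : i < l.length) :
    (l.reverse.eraseIdx i).reverse = l.eraseIdx (l.length - 1 - i) := by
  rw [List.eraseIdx_eq_take_drop_succ, List.reverse_append,
      List.reverse_take, List.reverse_drop, List.reverse_reverse,
      List.length_reverse,
      List.eraseIdx_eq_take_drop_succ]
  have h1 : l.length - (i + 1) = l.length - 1 - i := by omega
  have h2 : l.length - i = (l.length - 1 - i) + 1 := by omega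
  rw [h1, h2]

-- ===== VERDICT (by name: the statement is the Claim_ definition above) =====
theorem delete_middle_element_spec : Claim_equal_delete_middle_element := by
  intro stack _
  unfold Spec_delete_middle_element delete_middle_element delete_middle_element_alt
  cases stack with
  | nil => decide
  | cons a t =>
    rw [pvLoop1_eq, pvLoop2_eq, if_neg (by simp)]
    simp only [List.nil_append]
    have hlen : (a :: t).length / 2 < (a :: t).length := by
      simp; omega
    rw [Nat.sub_zero, reverse_eraseIdx_reverse _ _ hlen]
    have : (a :: t).length - 1 - (a :: t).length / 2 = ((a :: t).length - 1) / 2 := by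
      simp; omega
    rw [this, if_neg (by simp [List.isEmpty])]
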